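-- pv_equiv track=rewrite | github.com/Goasd/Monni | monni/games/urbanterror/urbanterror.py | clean_color_code
-- ===== SOURCE A (Python) =====
-- def clean_color_code(string):
--     result = ""
--     i = 0
--     while i < len(string):
--         if string[i] == "^":
--             i += 2
--         else:
--             result += string[i]
--             i += 1
--     return result
-- ===== SOURCE B (Python) =====
-- import re
--
-- def clean_color_code(string):
--     return re.sub(r"\^.?", "", string, flags=re.DOTALL)
-- ===== Notes on version B (the rewrite author's own statement) =====
-- stated objective: faster
-- what changed: Replaces the explicit index-advancing while loop with quadratic string accumulation by a single linear regex substitution that deletes each caret together with the optional following character (DOTALL so it also consumes a newline).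
import Mathlib
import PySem

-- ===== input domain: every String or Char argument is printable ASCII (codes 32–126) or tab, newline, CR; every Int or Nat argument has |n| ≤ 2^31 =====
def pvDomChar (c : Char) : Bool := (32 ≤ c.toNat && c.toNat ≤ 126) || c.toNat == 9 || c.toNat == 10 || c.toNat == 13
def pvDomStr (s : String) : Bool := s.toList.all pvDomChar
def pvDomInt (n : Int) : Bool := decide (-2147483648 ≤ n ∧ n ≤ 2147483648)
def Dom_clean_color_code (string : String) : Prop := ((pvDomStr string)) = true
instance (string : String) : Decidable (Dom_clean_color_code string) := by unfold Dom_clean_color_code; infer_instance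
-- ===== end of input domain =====

-- B replaces A's index-advancing while loop with one regex substitution (re.sub r"\^.?" with DOTALL); same return value, ported as a pattern-consuming scan.

-- ===== PORT A =====
-- while loop over an index i: '^' skips two positions, otherwise the character is appended to result
def cleanGoA (s : List Char) (i : Nat) (result : List Char) : List Char :=
  if h : i < s.length then
    if s[i] = '^' then cleanGoA s (i + 2) result
    else cleanGoA s (i + 1) (result ++ [s[i]])
  else result
termination_by s.length - i

def clean_color_code (string : String) : String :=
  String.mk (cleanGoA string.toList 0 [])

-- ===== PORT B =====
-- the regex \^.? with DOTALL deletes, left to right, each '^' together with the following character if any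
def cleanRe (s : List Char) : List Char :=
  match s with
  | [] => []
  | c :: rest => if c = '^' then cleanRe (rest.drop 1) else c :: cleanRe rest
termination_by s.length
decreasing_by all_goals simp

def clean_color_code_alt (string : String) : String :=
  String.mk (cleanRe string.toList)

-- ===== PRECONDITION & SPEC =====
def Spec_clean_color_code (string : String) (out : String) : Prop := out = clean_color_code_alt string
instance (string : String) (out : String) : Decidable (Spec_clean_color_code string out) := by unfold Spec_clean_color_code; infer_instance

-- ===== CLAIM (what is proved, stated in full; the proofs are below) =====
def Claim_equal_clean_color_code : Prop := ∀ (string : String), Dom_clean_color_code string → Spec_clean_color_code string (clean_color_code string)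

-- ===== LEMMAS AND PROOFS =====
theorem cleanGoA_eq_cleanRe (s : List Char) (i : Nat) (result : List Char) :
    cleanGoA s i result = result ++ cleanRe (s.drop i) := by
  induction i, result using cleanGoA.induct s with
  | case1 i result h hc ih =>
    rw [cleanGoA, dif_pos h, if_pos hc, ih, List.drop_eq_getElem_cons h, cleanRe,
      if_pos hc, List.drop_drop]
  | case2 i result h hc ih =>
    rw [cleanGoA, dif_pos h, if_neg hc, ih, List.drop_eq_getElem_cons h, cleanRe,
      if_neg hc]
    simp
  | case3 i result h =>
    rw [cleanGoA, dif_neg h, List.drop_eq_nil_iff.mpr (by omega), cleanRe, List.append_nil]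

-- ===== VERDICT (by name: the statement is the Claim_ definition above) =====
theorem clean_color_code_spec : Claim_equal_clean_color_code := by
  intro s _
  unfold Spec_clean_color_code clean_color_code clean_color_code_alt
  rw [cleanGoA_eq_cleanRe]
  simp
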